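-- pv_equiv track=rewrite | github.com/Hclover2003/finding_hidden_messages_in_dna | week1/6. numberToPattern/number_to_pattern.py | num_to_pattern
-- ===== SOURCE A (Python) =====
-- import math
--
-- def Remainder(num, quotient):
--     return num - (quotient*4)
--
-- def Quotient(num):
--     return math.floor(num/4)
--
-- def digit_to_letter(digit):
--     if digit == 0:
--         return 'a'
--     elif digit == 1:
--         return 'c'
--     elif digit == 2:
--         return 'g'
--     elif digit == 3:
--         return 't'
--     else:
--         raise Exception("Not a valid digit")
--
-- def num_to_pattern(index, k):
--     if k == 1:
--         return digit_to_letter(index)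
--     prefix = Quotient(index)
--     r = Remainder(index, prefix)
--     letter = digit_to_letter(r)
--     prefixPattern = num_to_pattern(prefix, k - 1)
--     return prefixPattern + letter
-- ===== SOURCE B (Python) =====
-- def num_to_pattern(index, k):
--     letters = "acgt"
--     result = ""
--     for _ in range(k - 1):
--         result = letters[index % 4] + result
--         index //= 4
--     return letters[index] + result
-- ===== Notes on version B (the rewrite author's own statement) =====
-- stated objective: simpler
-- what changed: Recursive base-4 decoding replaced by an iterative loop that extracts the low digit with % and // and prepends its letter, indexing a single 'acgt' lookup string instead of an if-chain helper.
import Mathlib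
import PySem

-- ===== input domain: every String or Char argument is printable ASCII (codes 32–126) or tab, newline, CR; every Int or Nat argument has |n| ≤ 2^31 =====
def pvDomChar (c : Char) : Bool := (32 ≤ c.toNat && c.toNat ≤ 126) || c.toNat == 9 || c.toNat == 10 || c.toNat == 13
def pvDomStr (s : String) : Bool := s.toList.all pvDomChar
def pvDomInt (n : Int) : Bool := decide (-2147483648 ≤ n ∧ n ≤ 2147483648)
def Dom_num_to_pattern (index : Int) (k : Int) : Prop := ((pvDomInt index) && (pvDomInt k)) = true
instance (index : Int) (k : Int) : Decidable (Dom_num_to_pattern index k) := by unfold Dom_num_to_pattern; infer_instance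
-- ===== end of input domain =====

-- B replaces A's recursion by an iterative low-digit loop over an 'acgt' lookup string (objective: simpler).


-- ===== PORT A =====
-- digit_to_letter: 'raise Exception' becomes [] (such inputs are outside Pre_)
def digit_to_letter (digit : Int) : List Char :=
  if digit == 0 then ['a']
  else if digit == 1 then ['c']
  else if digit == 2 then ['g']
  else if digit == 3 then ['t']
  else []

-- A's recursion, on the fuel k.toNat (k == 1 is the base case; for k ≤ 0 Python
-- recurses forever, outside Pre_). math.floor(index/4) is exact floor division
-- for |index| ≤ 2^31 (< 2^53), ported as PySem.Int.floordiv.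
def numToPatternRec (index : Int) : Nat → List Char
  | 0 => []
  | 1 => digit_to_letter index
  | (n+2) =>
      let pfx := PySem.Int.floordiv index 4
      let r := index - pfx * 4
      let letter := digit_to_letter r
      let prefixPattern := numToPatternRec pfx (n+1)
      prefixPattern ++ letter

def num_to_pattern (index : Int) (k : Int) : String :=
  String.ofList (numToPatternRec index k.toNat)

-- ===== PORT B =====
-- Source B: for _ in range(k-1): result = letters[index % 4] + result; index //= 4
-- letters[i] raising IndexError becomes [] (outside Pre_).
def num_to_pattern_alt (index : Int) (k : Int) : String :=
  let letters : List Char := "acgt".toList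
  let st := (PySem.List.pyRange 0 (k - 1) 1).foldl
    (fun (st : Int × List Char) _ =>
      (PySem.Int.floordiv st.1 4,
       (((PySem.List.pyGet? letters (PySem.Int.mod st.1 4)).map (fun c => [c])).getD []) ++ st.2))
    (index, [])
  String.ofList ((((PySem.List.pyGet? letters st.1).map (fun c => [c])).getD []) ++ st.2)

-- ===== PRECONDITION & SPEC =====
-- Pre_: exactly the inputs where A returns: k ≥ 1 and every extracted digit valid,
-- i.e. 0 ≤ index < 4^k (otherwise A raises its Exception, or recurses forever for k ≤ 0).
def Pre_num_to_pattern (index : Int) (k : Int) : Prop :=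
  1 ≤ k ∧ 0 ≤ index ∧ index < 4 ^ k.toNat
instance (index : Int) (k : Int) : Decidable (Pre_num_to_pattern index k) := by
  unfold Pre_num_to_pattern; infer_instance
def pvWitness_num_to_pattern : Int × Int := (11, 3)

def Spec_num_to_pattern (index : Int) (k : Int) (out : String) : Prop := out = num_to_pattern_alt index k
instance (index : Int) (k : Int) (out : String) : Decidable (Spec_num_to_pattern index k out) := by unfold Spec_num_to_pattern; infer_instance

-- ===== CLAIM (what is proved, stated in full; the proofs are below) =====
def Claim_equal_num_to_pattern : Prop := ∀ (index : Int) (k : Int), Dom_num_to_pattern index k → Pre_num_to_pattern index k → Spec_num_to_pattern index k (num_to_pattern index k)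

-- ===== LEMMAS AND PROOFS =====

-- B's loop body as a named function (the foldl body ignores the loop variable)
def bStep (st : Int × List Char) : Int × List Char :=
  (PySem.Int.floordiv st.1 4,
   (((PySem.List.pyGet? "acgt".toList (PySem.Int.mod st.1 4)).map (fun c => [c])).getD []) ++ st.2)

def bFin (st : Int × List Char) : List Char :=
  (((PySem.List.pyGet? "acgt".toList st.1).map (fun c => [c])).getD []) ++ st.2

lemma foldl_ignore {α β : Type} (g : β → β) (s : β) (l : List α) :
    l.foldl (fun st _ => g st) s = g^[l.length] s := by
  induction l generalizing s with
  | nil => rfl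
  | cons x xs ih => simp [List.foldl, ih, Function.iterate_succ_apply]

lemma letter_eq (d : Int) (h0 : 0 ≤ d) (h3 : d < 4) :
    (((PySem.List.pyGet? "acgt".toList d).map (fun c => [c])).getD []) = digit_to_letter d := by
  interval_cases d <;> decide

lemma key (m : Nat) : ∀ (index : Int) (acc : List Char), 0 ≤ index → index < 4 ^ (m + 1) →
    bFin (bStep^[m] (index, acc)) = numToPatternRec index (m + 1) ++ acc := by
  induction m with
  | zero =>
    intro index acc h0 h1
    simp only [Function.iterate_zero, id, bFin, numToPatternRec]
    rw [letter_eq index h0 (by exact_mod_cast h1)]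
  | succ m ih =>
    intro index acc h0 h1
    have hfd : PySem.Int.floordiv index 4 = index / 4 :=
      PySem.Int.floordiv_eq_ediv_of_pos (by norm_num)
    have hq0 : 0 ≤ index / 4 := Int.ediv_nonneg h0 (by norm_num)
    have hq1 : index / 4 < 4 ^ (m + 1) := by
      rw [Int.ediv_lt_iff_lt_mul (by norm_num)]
      calc index < 4 ^ (m + 1 + 1) := h1
        _ = 4 ^ (m + 1) * 4 := by ring
    rw [Function.iterate_succ_apply]
    have hstep : bStep (index, acc) =
        (index / 4, digit_to_letter (PySem.Int.mod index 4) ++ acc) := by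
      simp only [bStep, hfd]
      rw [letter_eq _ (PySem.Int.mod_nonneg index (by norm_num))
            (PySem.Int.mod_lt index (by norm_num))]
    rw [hstep, ih (index / 4) _ hq0 hq1]
    show numToPatternRec (index / 4) (m + 1) ++ (digit_to_letter (PySem.Int.mod index 4) ++ acc)
       = numToPatternRec index (m + 1 + 1) ++ acc
    have hmod : PySem.Int.mod index 4 = index - PySem.Int.floordiv index 4 * 4 := by
      have := PySem.Int.floordiv_mul_add_mod index 4
      omega
    rw [hmod, hfd]
    simp only [numToPatternRec, hfd, List.append_assoc]

lemma alt_eq (index k : Int) :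
    num_to_pattern_alt index k = String.ofList (bFin (bStep^[(k - 1).toNat] (index, []))) := by
  unfold num_to_pattern_alt
  show String.ofList (bFin ((PySem.List.pyRange 0 (k - 1) 1).foldl (fun st _ => bStep st) (index, []))) = _
  rw [foldl_ignore bStep (index, []) _, PySem.List.length_pyRange_one]
  norm_num

-- ===== VERDICT (by name: the statement is the Claim_ definition above) =====
theorem num_to_pattern_spec : Claim_equal_num_to_pattern := by
  intro index k _ hpre
  obtain ⟨hk, h0, h1⟩ := hpre
  unfold Spec_num_to_pattern
  obtain ⟨m, hm⟩ : ∃ m : Nat, k.toNat = m + 1 := ⟨k.toNat - 1, by omega⟩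
  rw [alt_eq index k]
  have hlen : (k - 1).toNat = m := by omega
  rw [hlen]
  unfold num_to_pattern
  rw [hm, key m index [] h0 (by rw [← hm]; exact_mod_cast h1), List.append_nil]
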